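-- pv_equiv track=rewrite | github.com/dmehrotra/uber-ocr | ocr/parse.py | try_order_e1
-- ===== SOURCE A (Python) =====
-- def try_order_e1(content):
-- 	line_index = None
-- 	for l in content:
-- 		if line_index == None:
-- 			if "Your Earnings" in l:
-- 				line_index = content.index(l)
-- 		else:
-- 			if "$" in l:
-- 				return l.strip()
-- ===== SOURCE B (Python) =====
-- def try_order_e1(content):
--     # Phase 1: locate first "Your Earnings" line; Phase 2: scan only the tail for "$".
--     for i, l in enumerate(content):
--         if "Your Earnings" in l:
--             for m in content[i + 1:]:
--                 if "$" in m:
--                     return m.strip()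
--             return None
--     return None
-- ===== Notes on version B (the rewrite author's own statement) =====
-- stated objective: simpler
-- what changed: Replaces the flag-variable single pass (with its redundant content.index call) by an explicit two-phase structure: enumerate to locate the marker line, then scan only the tail slice for the first '$' line.
import Mathlib
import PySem

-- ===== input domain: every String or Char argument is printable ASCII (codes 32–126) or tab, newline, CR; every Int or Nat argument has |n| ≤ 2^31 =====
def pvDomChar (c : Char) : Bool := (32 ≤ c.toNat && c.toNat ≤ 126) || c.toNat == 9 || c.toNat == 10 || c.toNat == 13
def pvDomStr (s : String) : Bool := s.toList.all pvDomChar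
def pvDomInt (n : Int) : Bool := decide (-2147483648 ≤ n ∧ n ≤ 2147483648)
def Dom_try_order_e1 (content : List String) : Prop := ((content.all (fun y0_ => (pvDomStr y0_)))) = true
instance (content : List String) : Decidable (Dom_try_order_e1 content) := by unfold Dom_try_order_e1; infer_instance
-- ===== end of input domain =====

-- B replaces A's flag-driven single pass by a locate-then-scan two-phase structure (simpler; return value only).

-- ===== PORT A =====
-- A's loop: state line_index : Option Nat (None until the marker line is seen);
-- content.index(l) is PySem.List.index? content l — exact, since l is always drawn from content.
def tryOrderALoop (content : List String) : List String → Option Nat → Option String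
  | [], _ => none
  | l :: rest, li =>
    if li = none then
      if PySem.Str.isIn "Your Earnings" l then
        tryOrderALoop content rest (PySem.List.index? content l)
      else
        tryOrderALoop content rest li
    else
      if PySem.Str.isIn "$" l then some (PySem.Str.strip l)
      else tryOrderALoop content rest li

def try_order_e1 (content : List String) : Option String :=
  tryOrderALoop content content none

-- ===== PORT B =====
-- inner loop of Source B: first line containing "$", stripped
def findDollar : List String → Option String
  | [] => none
  | m :: rest => if PySem.Str.isIn "$" m then some (PySem.Str.strip m) else findDollar rest

-- outer loop of Source B over enumerate(content)
def scanMarker (content : List String) : List (Int × String) → Option String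
  | [] => none
  | (i, l) :: rest =>
    if PySem.Str.isIn "Your Earnings" l then
      findDollar (PySem.List.slice content (some (i + 1)) none)
    else scanMarker content rest

def try_order_e1_alt (content : List String) : Option String :=
  scanMarker content (PySem.List.enumerate content 0)

-- ===== PRECONDITION & SPEC =====
def Spec_try_order_e1 (content : List String) (out : Option String) : Prop := out = try_order_e1_alt content
instance (content : List String) (out : Option String) : Decidable (Spec_try_order_e1 content out) := by unfold Spec_try_order_e1; infer_instance

-- ===== CLAIM (what is proved, stated in full; the proofs are below) =====
def Claim_equal_try_order_e1 : Prop := ∀ (content : List String), Dom_try_order_e1 content → Spec_try_order_e1 content (try_order_e1 content)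

-- ===== LEMMAS AND PROOFS =====

-- Once the marker is set, A's remaining scan is exactly B's inner loop.
theorem tryOrderALoop_some (content : List String) :
    ∀ (rest : List String) (k : Nat),
      tryOrderALoop content rest (some k) = findDollar rest := by
  intro rest
  induction rest with
  | nil => intro k; rfl
  | cons m t ih =>
    intro k
    simp only [tryOrderALoop, findDollar, reduceCtorEq, if_false]
    split <;> simp [ih]

theorem tryOrderALoop_eq_scan (content : List String) :
    ∀ (suffix : List String) (i : Nat), content.drop i = suffix →
      tryOrderALoop content suffix none =
        scanMarker content (PySem.List.enumerate suffix (i : Int)) := by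
  intro suffix
  induction suffix with
  | nil => intro i _; simp [tryOrderALoop, PySem.List.enumerate_nil, scanMarker]
  | cons l rest ih =>
    intro i hdrop
    have hmem : l ∈ content := by
      have : l ∈ content.drop i := by rw [hdrop]; exact List.mem_cons_self
      exact List.mem_of_mem_drop this
    have hdrop' : content.drop (i + 1) = rest := by
      rw [← List.tail_drop, hdrop]; rfl
    rw [PySem.List.enumerate_cons]
    simp only [tryOrderALoop, scanMarker]
    by_cases hm : PySem.Str.isIn "Your Earnings" l
    · rw [if_pos hm, if_pos hm]
      obtain ⟨k, hk⟩ := (PySem.List.index?_isSome_iff content l).mpr hmem |> Option.isSome_iff_exists.mp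
      rw [hk, tryOrderALoop_some]
      have hslice : PySem.List.slice content (some ((i : Int) + 1)) none = rest := by
        rw [PySem.List.slice_from content (by positivity : (0:Int) ≤ (i:Int) + 1)]
        have h1 : ((i : Int) + 1).toNat = i + 1 := by omega
        rw [h1, hdrop']
      rw [hslice]; simp
    · rw [if_neg hm, if_neg hm]
      have := ih (i + 1) hdrop'
      rw [this]
      norm_num

-- ===== VERDICT (by name: the statement is the Claim_ definition above) =====
theorem try_order_e1_spec : Claim_equal_try_order_e1 := by
  intro content _
  unfold Spec_try_order_e1 try_order_e1 try_order_e1_alt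
  exact tryOrderALoop_eq_scan content content 0 rfl
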